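-- pv_equiv track=rewrite | github.com/alumbreras/spartacus | spartacus_backend/services/mcp_gmail_client.py | _parse_labels_text
-- ===== SOURCE A (Python) =====
-- from typing import Dict, Any, List, Optional
--
-- def _parse_labels_text(text: str) -> List[Dict[str, Any]]:
--     """Parse labels from text format"""
--     labels = []
--
--     if not text.strip():
--         return labels
--
--     lines = text.strip().split('\n')
--     current_label = {}
--
--     for line in lines:
--         line = line.strip()
--         if not line:
--             continue
--
--         if line.startswith('ID: '):
--             # Save previous label if exists
--             if current_label.get('id'):
--                 labels.append(current_label.copy())
--
--             # Start new label
--             current_label = {'id': line[4:].strip()}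
--         elif line.startswith('Name: '):
--             current_label['name'] = line[6:].strip()
--         elif line.startswith('Type: '):
--             current_label['type'] = line[6:].strip()
--
--     # Don't forget the last label
--     if current_label.get('id'):
--         labels.append(current_label)
--
--     # Infer type if not present (system vs user)
--     for label in labels:
--         if 'type' not in label:
--             # System labels are typically uppercase single words
--             if label['id'] in ['INBOX', 'SENT', 'DRAFT', 'TRASH', 'SPAM', 'IMPORTANT', 'STARRED', 'UNREAD', 'CHAT']:
--                 label['type'] = 'system'
--             elif label['id'].startswith('CATEGORY_'):
--                 label['type'] = 'system'
--             else:
--                 label['type'] = 'user'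
--
--     return labels
-- ===== SOURCE B (Python) =====
-- # B: two-phase segment-then-parse, built back-to-front with a right-to-left scan,
-- # instead of A's interleaved flush-on-ID state machine.
-- from typing import Dict, Any, List
--
-- def _block_dict(block: List[str]) -> Dict[str, Any]:
--     d = {'id': block[0][4:].strip()}
--     for line in block[1:]:
--         if line.startswith('Name: '):
--             d['name'] = line[6:].strip()
--         elif line.startswith('Type: '):
--             d['type'] = line[6:].strip()
--     return d
--
-- def _with_type(d: Dict[str, Any]) -> Dict[str, Any]:
--     if 'type' in d:
--         return d
--     sysids = ('INBOX', 'SENT', 'DRAFT', 'TRASH', 'SPAM', 'IMPORTANT', 'STARRED', 'UNREAD', 'CHAT')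
--     t = 'system' if d['id'] in sysids or d['id'].startswith('CATEGORY_') else 'user'
--     return {**d, 'type': t}
--
-- def _parse_labels_text(text: str) -> List[Dict[str, Any]]:
--     lines = [l.strip() for l in text.strip().split('\n')]
--     # segment into blocks, scanning right-to-left: a block starts at each 'ID: ' line
--     blocks, pending = [], []
--     for l in reversed(lines):
--         if l.startswith('ID: '):
--             blocks.append([l] + pending)
--             pending = []
--         else:
--             pending = [l] + pending
--     blocks.reverse()
--     labels = [d for d in map(_block_dict, blocks) if d['id']]
--     return [_with_type(d) for d in labels]
-- ===== Notes on version B (the rewrite author's own statement) =====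
-- stated objective: alternative
-- what changed: Replaces A's single interleaved flush-on-ID state machine with a two-phase shape: a right-to-left scan that builds per-label blocks back-to-front, then a per-block dict build with truthy-id filtering and a separate type-inference map.
import Mathlib
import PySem

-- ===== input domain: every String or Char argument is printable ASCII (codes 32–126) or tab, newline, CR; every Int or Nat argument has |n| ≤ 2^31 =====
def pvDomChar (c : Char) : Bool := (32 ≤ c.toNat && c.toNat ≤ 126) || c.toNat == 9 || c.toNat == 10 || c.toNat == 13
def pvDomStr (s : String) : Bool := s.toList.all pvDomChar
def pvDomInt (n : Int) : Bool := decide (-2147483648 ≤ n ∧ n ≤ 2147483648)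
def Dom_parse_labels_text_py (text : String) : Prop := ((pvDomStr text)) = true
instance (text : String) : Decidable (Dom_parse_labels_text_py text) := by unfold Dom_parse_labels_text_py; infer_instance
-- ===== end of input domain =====

-- B replaces A's interleaved flush-on-ID state machine by a two-phase shape (right-to-left
-- block segmentation, then per-block dict building); objective: alternative decomposition.
-- A's type-inference loop mutates the dicts in place in Python; the equivalence is about the
-- return value (which is the same list of dicts).

-- ===== PORT A =====
-- truthiness of current_label.get('id') (None or '' are falsy)
def pvIdTruthy (d : PySem.Dict String String) : Bool :=
  match d.get? "id" with
  | some s => s != ""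
  | none => false

def pvSysA : List String :=
  ["INBOX", "SENT", "DRAFT", "TRASH", "SPAM", "IMPORTANT", "STARRED", "UNREAD", "CHAT"]

-- the final 'for label in labels: if "type" not in label: label["type"] = …' (in-place; as a map)
-- label['id'] is always present on these dicts, so the getD default is never used
def pvAInfer (d : PySem.Dict String String) : PySem.Dict String String :=
  if d.contains "type" then d
  else if pvSysA.contains (d.getD "id" "") then d.insert "type" "system"
  else if PySem.Str.startswith (d.getD "id" "") "CATEGORY_" then d.insert "type" "system"
  else d.insert "type" "user"

-- the main 'for line in lines' loop; state = (labels, current_label)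
def pvALoop : List String → PySem.Dict String String → List (PySem.Dict String String) →
    List (PySem.Dict String String) × PySem.Dict String String
  | [], cur, labels => (labels, cur)
  | l :: rest, cur, labels =>
    let s := PySem.Str.strip l
    if s == "" then pvALoop rest cur labels
    else if PySem.Str.startswith s "ID: " then
      pvALoop rest (PySem.Dict.mk [("id", PySem.Str.strip (PySem.Str.slice s (some 4) none))])
        (labels ++ (if pvIdTruthy cur then [cur] else []))
    else if PySem.Str.startswith s "Name: " then
      pvALoop rest (cur.insert "name" (PySem.Str.strip (PySem.Str.slice s (some 6) none))) labels
    else if PySem.Str.startswith s "Type: " then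
      pvALoop rest (cur.insert "type" (PySem.Str.strip (PySem.Str.slice s (some 6) none))) labels
    else pvALoop rest cur labels

def parse_labels_text_py (text : String) : List (List (String × String)) :=
  if PySem.Str.strip text == "" then []
  else
    -- sep "\n" ≠ "", so split? never returns none; getD [] is never used
    let lines := (PySem.Str.split? (PySem.Str.strip text) "\n").getD []
    let st := pvALoop lines PySem.Dict.empty []
    let labels := if pvIdTruthy st.2 then st.1 ++ [st.2] else st.1
    (labels.map pvAInfer).map PySem.Dict.items

-- ===== PORT B =====
def pvIsID (s : String) : Bool := PySem.Str.startswith s "ID: "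

-- body of _block_dict's loop over block[1:]
def pvNT (d : PySem.Dict String String) (line : String) : PySem.Dict String String :=
  if PySem.Str.startswith line "Name: " then
    d.insert "name" (PySem.Str.strip (PySem.Str.slice line (some 6) none))
  else if PySem.Str.startswith line "Type: " then
    d.insert "type" (PySem.Str.strip (PySem.Str.slice line (some 6) none))
  else d

-- _block_dict; blocks are always nonempty (head is the 'ID: ' line), so [] is unreachable
def pvBlockDict : List String → PySem.Dict String String
  | [] => PySem.Dict.empty
  | h :: t =>
    t.foldl pvNT (PySem.Dict.mk [("id", PySem.Str.strip (PySem.Str.slice h (some 4) none))])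

def pvSysB : List String :=
  ["INBOX", "SENT", "DRAFT", "TRASH", "SPAM", "IMPORTANT", "STARRED", "UNREAD", "CHAT"]

-- _with_type; {**d, 'type': t} with 'type' absent appends the pair, i.e. insert
def pvBWithType (d : PySem.Dict String String) : PySem.Dict String String :=
  if d.contains "type" then d
  else d.insert "type"
    (if pvSysB.contains (d.getD "id" "") || PySem.Str.startswith (d.getD "id" "") "CATEGORY_"
     then "system" else "user")

-- body of the right-to-left segmentation loop; state = (blocks-so-far, pending)
def pvBStep (st : List (List String) × List String) (l : String) :
    List (List String) × List String :=
  if pvIsID l then (st.1 ++ [l :: st.2], []) else (st.1, l :: st.2)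

def parse_labels_text_py_alt (text : String) : List (List (String × String)) :=
  let lines := ((PySem.Str.split? (PySem.Str.strip text) "\n").getD []).map PySem.Str.strip
  let st := lines.reverse.foldl pvBStep ([], [])
  let blocks := st.1.reverse
  let labels := (blocks.map pvBlockDict).filter (fun d => d.getD "id" "" != "")
  (labels.map pvBWithType).map PySem.Dict.items

-- ===== PRECONDITION & SPEC =====
def Spec_parse_labels_text_py (text : String) (out : List (List (String × String))) : Prop := out = parse_labels_text_py_alt text
instance (text : String) (out : List (List (String × String))) : Decidable (Spec_parse_labels_text_py text out) := by unfold Spec_parse_labels_text_py; infer_instance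

-- ===== CLAIM (what is proved, stated in full; the proofs are below) =====
def Claim_equal_parse_labels_text_py : Prop := ∀ (text : String), Dom_parse_labels_text_py text → Spec_parse_labels_text_py text (parse_labels_text_py text)

-- ===== LEMMAS AND PROOFS =====

-- specification form of B's segmentation, recursing head-first (blocks in document order)
def pvSegD : List String → List (List String) × List String
  | [] => ([], [])
  | l :: ls =>
    let p := pvSegD ls
    if pvIsID l then ((l :: p.2) :: p.1, []) else (p.1, l :: p.2)

def pvFlush (st : List (PySem.Dict String String) × PySem.Dict String String) :
    List (PySem.Dict String String) :=
  if pvIdTruthy st.2 then st.1 ++ [st.2] else st.1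

def pvKept (bs : List (List String)) : List (PySem.Dict String String) :=
  (bs.map pvBlockDict).filter (fun d => d.getD "id" "" != "")

lemma pvNT_get_id (d : PySem.Dict String String) (l : String) :
    (pvNT d l).get? "id" = d.get? "id" := by
  unfold pvNT
  split_ifs <;> simp [PySem.Dict.get?_insert_of_ne _ _ (by decide : ("id" : String) ≠ "name"),
    PySem.Dict.get?_insert_of_ne _ _ (by decide : ("id" : String) ≠ "type")]

lemma pvAbsorb_get_id (pend : List String) (d : PySem.Dict String String) :
    (pend.foldl pvNT d).get? "id" = d.get? "id" := by
  induction pend generalizing d with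
  | nil => rfl
  | cons x xs ih => simp [List.foldl_cons, ih, pvNT_get_id]

lemma pvBridge (lines : List String) :
    lines.reverse.foldl pvBStep ([], []) = ((pvSegD lines).1.reverse, (pvSegD lines).2) := by
  rw [List.foldl_reverse]
  induction lines with
  | nil => rfl
  | cons l ls ih =>
    simp only [List.foldr_cons]
    rw [ih]
    simp only [pvSegD, pvBStep]
    split_ifs <;> simp

lemma pvNT_empty (d : PySem.Dict String String) : pvNT d "" = d := by
  unfold pvNT
  rw [show PySem.Str.startswith "" "Name: " = false by decide,
      show PySem.Str.startswith "" "Type: " = false by decide]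
  simp

lemma pvIdTruthy_blockDict (h : String) (t : List String) :
    (pvIdTruthy (pvBlockDict (h :: t)) = true) ↔
      ((pvBlockDict (h :: t)).getD "id" "" != "") = true := by
  unfold pvBlockDict pvIdTruthy
  rw [PySem.Dict.getD_eq_get?_getD, pvAbsorb_get_id]
  simp [PySem.Dict.get?_mk_cons]

lemma pvMain (lines : List String) (cur : PySem.Dict String String)
    (labels : List (PySem.Dict String String)) :
    pvFlush (pvALoop lines cur labels) =
      labels ++ pvFlush ([], (pvSegD (lines.map PySem.Str.strip)).2.foldl pvNT cur)
        ++ pvKept (pvSegD (lines.map PySem.Str.strip)).1 := by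
  induction lines generalizing cur labels with
  | nil =>
    simp [pvALoop, pvSegD, pvFlush, pvKept]
    split_ifs <;> simp
  | cons l ls ih =>
    simp only [pvALoop, List.map_cons, pvSegD]
    by_cases h0 : PySem.Str.strip l == ""
    · rw [if_pos h0]
      have he : PySem.Str.strip l = "" := by simpa using h0
      rw [he]
      rw [if_neg (show ¬ (pvIsID "" = true) by decide)]
      dsimp only
      simp only [List.foldl_cons, pvNT_empty]
      exact ih cur labels
    · rw [if_neg h0]
      by_cases h1 : PySem.Str.startswith (PySem.Str.strip l) "ID: "
      · rw [if_pos h1]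
        rw [ih]
        rw [if_pos (show pvIsID (PySem.Str.strip l) = true from h1)]
        dsimp only
        -- fold the new current label into the kept-blocks list
        have hb : pvKept ((PySem.Str.strip l :: (pvSegD (ls.map PySem.Str.strip)).2)
              :: (pvSegD (ls.map PySem.Str.strip)).1) =
            pvFlush ([], (pvSegD (ls.map PySem.Str.strip)).2.foldl pvNT
              (PySem.Dict.mk [("id",
                PySem.Str.strip (PySem.Str.slice (PySem.Str.strip l) (some 4) none))]))
              ++ pvKept (pvSegD (ls.map PySem.Str.strip)).1 := by
          unfold pvKept pvFlush
          simp only [List.map_cons, List.filter_cons]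
          by_cases ht : pvIdTruthy (pvBlockDict
              (PySem.Str.strip l :: (pvSegD (ls.map PySem.Str.strip)).2)) = true
          · rw [if_pos ((pvIdTruthy_blockDict _ _).mp ht)]
            rw [if_pos (by simpa [pvBlockDict] using ht)]
            simp [pvBlockDict]
          · rw [if_neg (fun hc => ht ((pvIdTruthy_blockDict _ _).mpr hc))]
            rw [if_neg (by simpa [pvBlockDict] using ht)]
            simp
        rw [hb]
        simp only [pvFlush, List.foldl_nil, List.append_assoc]
        split_ifs <;> simp
      · rw [if_neg h1]
        rw [if_neg (show ¬ (pvIsID (PySem.Str.strip l) = true) from h1)]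
        dsimp only
        simp only [List.foldl_cons]
        by_cases h2 : PySem.Str.startswith (PySem.Str.strip l) "Name: "
        · rw [if_pos h2]
          have hnt : pvNT cur (PySem.Str.strip l) = cur.insert "name"
              (PySem.Str.strip (PySem.Str.slice (PySem.Str.strip l) (some 6) none)) := by
            unfold pvNT; rw [if_pos h2]
          rw [hnt]
          exact ih _ _
        · rw [if_neg h2]
          by_cases h3 : PySem.Str.startswith (PySem.Str.strip l) "Type: "
          · rw [if_pos h3]
            have hnt : pvNT cur (PySem.Str.strip l) = cur.insert "type"
                (PySem.Str.strip (PySem.Str.slice (PySem.Str.strip l) (some 6) none)) := by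
              unfold pvNT; rw [if_neg h2, if_pos h3]
            rw [hnt]
            exact ih _ _
          · rw [if_neg h3]
            have hnt : pvNT cur (PySem.Str.strip l) = cur := by
              unfold pvNT; rw [if_neg h2, if_neg h3]
            rw [hnt]
            exact ih _ _

lemma pvInfer_eq (d : PySem.Dict String String) : pvAInfer d = pvBWithType d := by
  unfold pvAInfer pvBWithType pvSysA pvSysB
  split_ifs with hc h1 h2 h3 h4 <;> simp_all

-- ===== VERDICT (by name: the statement is the Claim_ definition above) =====
theorem parse_labels_text_py_spec : Claim_equal_parse_labels_text_py := by
  unfold Claim_equal_parse_labels_text_py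
  intro text _
  unfold Spec_parse_labels_text_py parse_labels_text_py parse_labels_text_py_alt
  by_cases h : PySem.Str.strip text == ""
  · rw [if_pos h]
    have he : PySem.Str.strip text = "" := by simpa using h
    rw [he]
    decide
  · rw [if_neg h]
    have hfun : pvAInfer = pvBWithType := funext pvInfer_eq
    dsimp only
    rw [pvBridge, List.reverse_reverse, hfun]
    have hflush : pvFlush ([], (pvSegD (List.map PySem.Str.strip ((PySem.Str.split? (PySem.Str.strip text) "\n").getD []))).2.foldl pvNT PySem.Dict.empty) = [] := by
      unfold pvFlush pvIdTruthy
      rw [pvAbsorb_get_id]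
      simp [PySem.Dict.get?_empty]
    have hmain := pvMain ((PySem.Str.split? (PySem.Str.strip text) "\n").getD []) PySem.Dict.empty []
    rw [hflush, List.nil_append, List.nil_append] at hmain
    have : pvFlush (pvALoop ((PySem.Str.split? (PySem.Str.strip text) "\n").getD []) PySem.Dict.empty []) = pvKept (pvSegD (((PySem.Str.split? (PySem.Str.strip text) "\n").getD []).map PySem.Str.strip)).1 := hmain
    unfold pvFlush pvKept at this
    rw [this]
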